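-- pv_equiv track=rewrite | github.com/LegionMG/sci_code | pansiot.py | get_codewalk
-- ===== SOURCE A (Python) =====
-- def get_codewalk(codeword):
-- 	i = 0
-- 	while codeword[i] == "0":
-- 		i+=1
-- 	result = ""
-- 	count = 0
-- 	for j in range(i, len(codeword)):
-- 		if codeword[j] == "0":
-- 			count+=1
-- 		else:
-- 			result+=str(count)
-- 			count = 0
-- 	return result[1:]
-- ===== SOURCE B (Python) =====
-- def get_codewalk(codeword):
--     pos = [j for j, ch in enumerate(codeword) if ch != "0"]
--     return "".join(str(b - a - 1) for a, b in zip(pos, pos[1:]))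
-- ===== Notes on version B (the rewrite author's own statement) =====
-- stated objective: simpler
-- what changed: Replaced the stateful skip-then-scan loop with an accumulator string by collecting the positions of all non-'0' characters and joining the gap sizes between consecutive positions.
import Mathlib
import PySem

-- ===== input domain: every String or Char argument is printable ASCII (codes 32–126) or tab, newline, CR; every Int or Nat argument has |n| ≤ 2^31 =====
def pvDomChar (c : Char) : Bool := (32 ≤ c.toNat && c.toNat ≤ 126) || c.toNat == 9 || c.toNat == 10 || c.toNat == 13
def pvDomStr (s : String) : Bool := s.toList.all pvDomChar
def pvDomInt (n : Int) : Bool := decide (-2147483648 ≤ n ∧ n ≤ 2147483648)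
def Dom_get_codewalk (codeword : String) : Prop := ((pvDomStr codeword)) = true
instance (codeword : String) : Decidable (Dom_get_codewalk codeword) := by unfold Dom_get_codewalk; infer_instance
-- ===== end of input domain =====

-- B replaces A's stateful skip-then-scan loop by "positions of non-'0' chars, then join the gap sizes"; same cost, shorter.

-- ===== PORT A =====
-- the `while codeword[i] == "0": i += 1` loop: first index holding a non-'0' char; none = IndexError
def pvSkipA : List Char → Option Nat
  | [] => none
  | c :: cs => if c = '0' then (pvSkipA cs).map (· + 1) else some 0

-- the `for j in range(i, len(codeword))` loop carrying (result, count)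
def pvLoopA : List Char → List Char → Int → List Char
  | [], res, _ => res
  | c :: cs, res, cnt =>
      if c = '0' then pvLoopA cs res (cnt + 1)
      else pvLoopA cs (res ++ PySem.Int.toChars cnt) 0

def get_codewalk (codeword : String) : String :=
  match pvSkipA codeword.toList with
  | none => ""   -- Python raises IndexError here; excluded by Pre_
  | some i =>
      String.ofList (PySem.Chars.slice (pvLoopA (codeword.toList.drop i) [] 0) (some 1) none)

-- ===== PORT B =====
def get_codewalk_alt (codeword : String) : String :=
  let pos : List Int :=
    ((PySem.List.enumerate codeword.toList 0).filter (fun p => p.2 != '0')).map (·.1)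
  PySem.Str.join ""
    ((pos.zip (PySem.List.slice pos (some 1) none)).map (fun p => PySem.Int.toStr (p.2 - p.1 - 1)))

-- ===== PRECONDITION & SPEC =====
-- Pre_ excludes exactly the inputs on which A raises IndexError: empty or all-'0' codewords.
def Pre_get_codewalk (codeword : String) : Prop := (codeword.toList.any (fun c => c != '0')) = true
instance (codeword : String) : Decidable (Pre_get_codewalk codeword) := by unfold Pre_get_codewalk; infer_instance

def pvWitness_get_codewalk : String := "10010"


def Spec_get_codewalk (codeword : String) (out : String) : Prop := out = get_codewalk_alt codeword
instance (codeword : String) (out : String) : Decidable (Spec_get_codewalk codeword out) := by unfold Spec_get_codewalk; infer_instance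

-- ===== CLAIM (what is proved, stated in full; the proofs are below) =====
def Claim_equal_get_codewalk : Prop := ∀ (codeword : String), Dom_get_codewalk codeword → Pre_get_codewalk codeword → Spec_get_codewalk codeword (get_codewalk codeword)

-- ===== LEMMAS AND PROOFS =====

-- positions (as Ints) of the non-'0' characters
def pvP : List Char → List Int
  | [] => []
  | c :: cs => if c = '0' then (pvP cs).map (· + 1) else 0 :: (pvP cs).map (· + 1)

-- gaps between consecutive positions
def pvGaps (ps : List Int) : List Int := (ps.zip ps.tail).map (fun p => p.2 - p.1 - 1)

-- the numbers A's for-loop emits, started with `count` zeros already seen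
def pvF : List Char → Int → List Int
  | [], _ => []
  | c :: cs, cnt => if c = '0' then pvF cs (cnt + 1) else cnt :: pvF cs 0

theorem pvGaps_cons_cons (a b : Int) (r : List Int) :
    pvGaps (a :: b :: r) = (b - a - 1) :: pvGaps (b :: r) := by
  simp [pvGaps]

theorem pvGaps_map_add : ∀ ps : List Int, pvGaps (ps.map (· + 1)) = pvGaps ps
  | [] => rfl
  | [_] => rfl
  | a :: b :: r => by
      have ih := pvGaps_map_add (b :: r)
      simp only [List.map_cons] at ih ⊢
      rw [pvGaps_cons_cons, pvGaps_cons_cons, ih]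
      congr 1
      omega

theorem pvF_eq : ∀ (cs : List Char) (cnt : Int), pvF cs cnt = pvGaps (-(cnt + 1) :: pvP cs)
  | [], cnt => by simp [pvF, pvP, pvGaps]
  | c :: cs, cnt => by
      by_cases h : c = '0'
      · have ih := pvF_eq cs (cnt + 1)
        simp only [pvF, pvP, if_pos h]
        have hc : (-(cnt + 1) :: (pvP cs).map (· + 1))
            = (-(cnt + 1 + 1) :: pvP cs).map (· + 1) := by
          rw [List.map_cons]; congr 1; omega
        rw [hc, pvGaps_map_add]
        exact ih
      · have ih := pvF_eq cs 0
        simp only [pvF, pvP, if_neg h]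
        rw [pvGaps_cons_cons]
        congr 1
        · omega
        · have hc : ((0 : Int) :: (pvP cs).map (· + 1))
              = ((-1 : Int) :: pvP cs).map (· + 1) := by
            rw [List.map_cons]; norm_num
          rw [hc, pvGaps_map_add]
          simpa using ih

theorem pvLoopA_eq : ∀ (cs res : List Char) (cnt : Int),
    pvLoopA cs res cnt = res ++ ((pvF cs cnt).map PySem.Int.toChars).flatten
  | [], res, cnt => by simp [pvLoopA, pvF]
  | c :: cs, res, cnt => by
      by_cases h : c = '0'
      · simp only [pvLoopA, pvF, if_pos h]
        exact pvLoopA_eq cs res (cnt + 1)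
      · simp only [pvLoopA, pvF, if_neg h, List.map_cons, List.flatten_cons]
        rw [pvLoopA_eq cs (res ++ PySem.Int.toChars cnt) 0, List.append_assoc]

theorem join_nil_eq_flatten : ∀ l : List (List Char), PySem.Chars.join [] l = l.flatten
  | [] => by simp [PySem.Chars.join_nil]
  | [p] => by simp [PySem.Chars.join_singleton]
  | p :: q :: r => by
      rw [PySem.Chars.join_cons_cons, join_nil_eq_flatten (q :: r)]
      simp

theorem pvMaster : ∀ cs : List Char,
    (match pvSkipA cs with
     | none => ([] : List Char)
     | some i => (pvLoopA (cs.drop i) [] 0).tail)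
    = ((pvGaps (pvP cs)).map PySem.Int.toChars).flatten
  | [] => rfl
  | c :: cs => by
      have ih := pvMaster cs
      by_cases h : c = '0'
      · simp only [pvSkipA, pvP, if_pos h]
        cases hs : pvSkipA cs with
        | none =>
            rw [hs] at ih
            simp only [Option.map_none]
            rw [pvGaps_map_add]
            simpa using ih
        | some i =>
            rw [hs] at ih
            simp only [Option.map_some, List.drop_succ_cons]
            rw [pvGaps_map_add]
            simpa using ih
      · simp only [pvSkipA, pvP, if_neg h, List.drop_zero]
        rw [pvLoopA_eq]
        simp only [pvF, if_neg h, List.nil_append, List.map_cons, List.flatten_cons]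
        have h0 : PySem.Int.toChars 0 = ['0'] := by decide
        rw [h0]
        simp only [List.cons_append, List.nil_append, List.tail_cons]
        have hc : ((0 : Int) :: (pvP cs).map (· + 1)) = ((-1 : Int) :: pvP cs).map (· + 1) := by
          rw [List.map_cons]; norm_num
        rw [hc, pvGaps_map_add]
        have := pvF_eq cs 0
        norm_num at this
        rw [this]

theorem pvPos_enum : ∀ (cs : List Char) (s : Int),
    ((PySem.List.enumerate cs s).filter (fun p => p.2 != '0')).map (·.1) = (pvP cs).map (· + s)
  | [], _ => by simp [PySem.List.enumerate, pvP]
  | c :: cs, s => by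
      rw [PySem.List.enumerate_cons]
      have ih := pvPos_enum cs (s + 1)
      by_cases h : c = '0'
      · simp [h, pvP, ih, List.map_map]
        intro x _
        omega
      · have hb : (c != '0') = true := by simpa using h
        simp [hb, h, pvP, ih, List.map_map]
        intro x _
        omega

theorem pvAB_toList_eq (codeword : String) :
    (get_codewalk codeword).toList = (get_codewalk_alt codeword).toList := by
  -- A side
  have hA : (get_codewalk codeword).toList
      = ((pvGaps (pvP codeword.toList)).map PySem.Int.toChars).flatten := by
    rw [← pvMaster codeword.toList]
    unfold get_codewalk
    cases hs : pvSkipA codeword.toList with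
    | none => simp
    | some i =>
        simp [PySem.Chars.slice_eq_listSlice, PySem.List.slice_from_one]
  -- B side
  have hpos : ((PySem.List.enumerate codeword.toList 0).filter (fun p => p.2 != '0')).map (·.1)
      = pvP codeword.toList := by
    rw [pvPos_enum codeword.toList 0]
    simp
  rw [hA]
  simp only [get_codewalk_alt]
  rw [hpos, PySem.Str.toList_join, PySem.List.slice_from_one,
      show ("" : String).toList = ([] : List Char) from rfl, join_nil_eq_flatten]
  simp only [pvGaps, List.map_map]
  refine congrArg List.flatten ?_
  refine List.map_congr_left ?_
  intro p _
  simp [PySem.Int.toList_toStr]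

-- ===== VERDICT (by name: the statement is the Claim_ definition above) =====
theorem get_codewalk_spec : Claim_equal_get_codewalk := by
  intro codeword _ _
  unfold Spec_get_codewalk
  exact String.toList_inj.mp (pvAB_toList_eq codeword)
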